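-- pv_equiv track=rewrite | github.com/nixternal/CodingChallenges | EverybodyCodes/2024-The_Kingdom_of_Algorithmia/01.py | part_three
-- ===== SOURCE A (Python) =====
-- CREATURES = {"x": 0, "A": 0, "B": 1, "C": 3, "D": 5}
--
-- def part_three(data: list) -> int:
--     """Sum potions for creatures pairs & groups with bonuses"""
--     potions = 0
--     line = data[2]
--
--     for i in range(0, len(line), 3):
--         group = line[i : i + 3]
--
--         # Add base costs
--         potions += sum(CREATURES[c] for c in group)
--
--         # Add bonus: 6 if no 'x', 2 if one 'x', 0 if two or more 'x'
--         xct = group.count("x")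
--         potions += 6 if xct == 0 else 2 if xct == 1 else 0
--
--     return potions
-- ===== SOURCE B (Python) =====
-- CREATURES = {"x": 0, "A": 0, "B": 1, "C": 3, "D": 5}
--
-- def _bonus(xct):
--     return 6 if xct == 0 else 2 if xct == 1 else 0
--
-- def part_three(data: list) -> int:
--     """Single character-level scan with a state machine (position in the
--     current group of 3 and its x-count); no slicing, no stride arithmetic."""
--     line = data[2]
--     total = 0
--     pos = 0
--     xct = 0
--     for c in line:
--         total += CREATURES[c]
--         if c == "x":
--             xct += 1
--         pos += 1
--         if pos == 3:
--             total += _bonus(xct)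
--             pos = 0
--             xct = 0
--     if pos:
--         total += _bonus(xct)
--     return total
-- ===== Notes on version B (the rewrite author's own statement) =====
-- stated objective: alternative
-- what changed: B replaces A's stride-3 range loop that slices out and re-processes each 3-character group by a single character-level scan carrying a small state machine (position within the current group and its running x-count), flushing the bonus on each group boundary and once at the end.
import Mathlib
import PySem

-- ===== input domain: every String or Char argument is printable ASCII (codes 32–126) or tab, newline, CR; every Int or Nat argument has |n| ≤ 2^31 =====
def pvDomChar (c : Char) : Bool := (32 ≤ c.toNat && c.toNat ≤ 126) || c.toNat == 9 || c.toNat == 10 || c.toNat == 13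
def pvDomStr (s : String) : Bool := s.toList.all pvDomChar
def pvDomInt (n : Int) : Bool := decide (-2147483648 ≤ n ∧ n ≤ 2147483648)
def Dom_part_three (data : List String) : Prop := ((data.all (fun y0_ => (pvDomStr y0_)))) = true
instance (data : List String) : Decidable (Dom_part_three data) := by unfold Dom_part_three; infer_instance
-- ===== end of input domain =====

-- B replaces A's stride-3 loop over slices by a single character-level scan with a
-- state machine (position in the current group, running x-count) (objective: alternative).

-- ===== PORT A =====
-- CREATURES = {"x": 0, "A": 0, "B": 1, "C": 3, "D": 5}
def pvCreatures : PySem.Dict Char Int :=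
  PySem.Dict.ofList [('x', 0), ('A', 0), ('B', 1), ('C', 3), ('D', 5)]

def part_three (data : List String) : Int :=
  match PySem.List.pyGet? data 2 with
  | none => 0          -- data[2]: IndexError, excluded by Pre_
  | some line =>
    let cs := line.toList
    (PySem.List.pyRange 0 (cs.length : Int) 3).foldl (fun potions i =>
      let group := PySem.List.slice cs (some i) (some (i + 3))
      -- CREATURES[c]: KeyError for chars outside the dict, excluded by Pre_
      let potions := potions + (group.map (fun c => PySem.Dict.getD pvCreatures c 0)).sum
      let xct := group.count 'x'
      potions + (if xct = 0 then 6 else if xct = 1 then 2 else 0)) 0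

-- ===== PORT B =====
-- _bonus(xct)
def pvBonus (xct : Nat) : Int := if xct = 0 then 6 else if xct = 1 then 2 else 0

-- one loop-body step of B: state = (total, pos, xct)
def pvStep (st : Int × Nat × Nat) (c : Char) : Int × Nat × Nat :=
  let total := st.1 + PySem.Dict.getD pvCreatures c 0
  let xct := if c = 'x' then st.2.2 + 1 else st.2.2
  let pos := st.2.1 + 1
  if pos = 3 then (total + pvBonus xct, 0, 0) else (total, pos, xct)

def part_three_alt (data : List String) : Int :=
  match PySem.List.pyGet? data 2 with
  | none => 0          -- data[2]: IndexError, excluded by Pre_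
  | some line =>
    let st := line.toList.foldl pvStep (0, 0, 0)
    if st.2.1 ≠ 0 then st.1 + pvBonus st.2.2 else st.1

-- ===== PRECONDITION & SPEC =====
-- Pre_ excludes inputs where the Python raises: data[2] (IndexError when len(data) < 3)
-- and CREATURES[c] (KeyError when the line has a character other than x, A, B, C, D).
def Pre_part_three (data : List String) : Prop :=
  3 ≤ data.length ∧
    ((data.getD 2 "").toList.all (fun c => c = 'x' ∨ c = 'A' ∨ c = 'B' ∨ c = 'C' ∨ c = 'D')) = true
instance (data : List String) : Decidable (Pre_part_three data) := by unfold Pre_part_three; infer_instance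

def pvWitness_part_three : List String := ["", "", "ABxCDxD"]

def Spec_part_three (data : List String) (out : Int) : Prop := out = part_three_alt data
instance (data : List String) (out : Int) : Decidable (Spec_part_three data out) := by unfold Spec_part_three; infer_instance

-- ===== CLAIM (what is proved, stated in full; the proofs are below) =====
def Claim_equal_part_three : Prop := ∀ (data : List String), Dom_part_three data → Pre_part_three data → Spec_part_three data (part_three data)

-- ===== LEMMAS AND PROOFS =====

-- cost of one group of ≤ 3 characters (base values + bonus), the common spec
def pvChunk (g : List Char) : Int :=
  (g.map (fun c => PySem.Dict.getD pvCreatures c 0)).sum + pvBonus (g.count 'x')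

-- the whole line's value, consuming 3 characters at a time
def pvG : List Char → Int
  | [] => 0
  | [a] => pvChunk [a]
  | [a, b] => pvChunk [a, b]
  | a :: b :: c :: rest => pvChunk [a, b, c] + pvG rest

-- range(0, n, 3) as a Nat-indexed closed form.
lemma pyRange3_closed (n : Nat) :
    PySem.List.pyRange 0 (n : Int) 3 =
      (List.range ((n + 2) / 3)).map (fun k => ((3 * k : Nat) : Int)) := by
  rw [PySem.List.pyRange_of_pos 0 (n : Int) (by norm_num)]
  have hcount : (if (0 : Int) < (n : Int) then (((n : Int) - 0 + 3 - 1) / 3).toNat else 0)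
      = (n + 2) / 3 := by
    split_ifs with h <;> omega
  rw [hcount]
  apply List.map_congr_left
  intro k _
  push_cast
  ring

-- a slice at a Nat-cast start of length 3 is drop/take.
lemma slice3_eq (cs : List Char) (k : Nat) :
    PySem.List.slice cs (some ((3 * k : Nat) : Int)) (some (((3 * k : Nat) : Int) + 3)) =
      (cs.drop (3 * k)).take 3 := by
  have : ((3 * k : Nat) : Int) + 3 = ((3 * k + 3 : Nat) : Int) := by push_cast; ring
  rw [this, PySem.List.slice_natCast]
  congr 1
  omega

-- summing pvChunk over the 3-chunks of a list equals pvG.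
lemma chunkG : (cs : List Char) →
    ((List.range ((cs.length + 2) / 3)).map
      (fun k => pvChunk ((cs.drop (3 * k)).take 3))).sum = pvG cs
  | [] => by simp [pvG]
  | [a] => by simp [pvG]
  | [a, b] => by simp [pvG, List.range_succ]
  | a :: b :: c :: rest => by
    have ih := chunkG rest
    have hlen : ((a :: b :: c :: rest).length + 2) / 3 = (rest.length + 2) / 3 + 1 := by
      simp; omega
    have hdrop : ∀ k : Nat, (a :: b :: c :: rest).drop (3 * (k + 1)) = rest.drop (3 * k) := by
      intro k
      have h3 : 3 * (k + 1) = 3 * k + 1 + 1 + 1 := by ring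
      rw [h3]; rfl
    rw [hlen, List.range_succ_eq_map]
    simp only [List.map_cons, List.map_map, List.sum_cons, Function.comp_def, hdrop,
      Nat.mul_zero, List.drop_zero, List.take_succ_cons, List.take_zero]
    rw [ih, pvG]

-- B's trailing flush on a final state
def pvFlush (st : Int × Nat × Nat) : Int := if st.2.1 ≠ 0 then st.1 + pvBonus st.2.2 else st.1

-- three steps from a fresh group state consume one full group
lemma step3 (t : Int) (a b c : Char) :
    pvStep (pvStep (pvStep (t, 0, 0) a) b) c
      = (t + PySem.Dict.getD pvCreatures a 0 + PySem.Dict.getD pvCreatures b 0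
          + PySem.Dict.getD pvCreatures c 0 + pvBonus ([a, b, c].count 'x'), 0, 0) := by
  by_cases ha : a = 'x' <;> by_cases hb : b = 'x' <;> by_cases hc : c = 'x' <;>
    simp [pvStep, ha, hb, hc]

-- B's scan from a fresh group state, then the trailing flush, equals t + pvG cs.
lemma scan_eq : (cs : List Char) → ∀ t : Int,
    pvFlush (cs.foldl pvStep (t, 0, 0)) = t + pvG cs
  | [] => by intro t; simp [pvFlush, pvG]
  | [a] => by
    intro t
    by_cases ha : a = 'x' <;>
      simp [pvStep, pvFlush, pvG, pvChunk, pvBonus, ha] <;> ring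
  | [a, b] => by
    intro t
    by_cases ha : a = 'x' <;> by_cases hb : b = 'x' <;>
      simp [pvStep, pvFlush, pvG, pvChunk, pvBonus, ha, hb] <;> ring
  | a :: b :: c :: rest => by
    intro t
    have h3 := step3 t a b c
    have hfold : (a :: b :: c :: rest).foldl pvStep (t, 0, 0)
        = rest.foldl pvStep (pvStep (pvStep (pvStep (t, 0, 0) a) b) c) := rfl
    rw [hfold, h3, scan_eq rest, pvG, pvChunk]
    simp
    ring

-- ===== VERDICT (by name: the statement is the Claim_ definition above) =====
theorem part_three_spec : Claim_equal_part_three := by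
  unfold Claim_equal_part_three
  intro data _ _
  unfold Spec_part_three part_three part_three_alt
  cases PySem.List.pyGet? data 2 with
  | none => rfl
  | some line =>
    simp only []
    set cs := line.toList with hcs
    have hfun : (fun (potions : Int) (i : Int) =>
        potions + ((PySem.List.slice cs (some i) (some (i + 3))).map
            (fun c => PySem.Dict.getD pvCreatures c 0)).sum +
          (if (PySem.List.slice cs (some i) (some (i + 3))).count 'x' = 0 then 6
           else if (PySem.List.slice cs (some i) (some (i + 3))).count 'x' = 1 then 2 else 0))
      = (fun (potions : Int) (i : Int) =>
        potions + pvChunk (PySem.List.slice cs (some i) (some (i + 3)))) := by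
      funext p i; simp [pvChunk, pvBonus]; ring
    rw [hfun, PySem.List.foldl_add, pyRange3_closed]
    simp only [List.map_map, Function.comp_def, slice3_eq, zero_add]
    rw [chunkG]
    have hb : (let st := cs.foldl pvStep (0, 0, 0)
      if st.2.1 ≠ 0 then st.1 + pvBonus st.2.2 else st.1) = pvFlush (cs.foldl pvStep (0, 0, 0)) := rfl
    rw [hb, scan_eq cs 0]
    ring
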